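-- pv_equiv track=rewrite | github.com/COOLMSF/Jiedan | BS/MySSLVPN.rar等2个文件/MyRSA.py | num_to_str
-- ===== SOURCE A (Python) =====
-- def num_to_str(arr,arr_len):
--     res=""
--     for val in arr:
--         tmp=""
--         for i in range(arr_len):
--             asc_num=val&0xFF
--             tmp=chr(asc_num)+tmp
--             val=val>>8
--         res=res+tmp
--     return res
-- ===== SOURCE B (Python) =====
-- def num_to_str(arr, arr_len):
--     if arr_len <= 0:
--         return ""
--     mask = (1 << (8 * arr_len)) - 1
--     return "".join((v & mask).to_bytes(arr_len, 'big').decode('latin-1') for v in arr)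
-- ===== Notes on version B (the rewrite author's own statement) =====
-- stated objective: idiomatic
-- what changed: The inner per-byte shift/mask/prepend loop is replaced by a single masked int.to_bytes(arr_len,'big').decode('latin-1') conversion per value, joined with ''.join, with an early return '' for arr_len <= 0.
import Mathlib
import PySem

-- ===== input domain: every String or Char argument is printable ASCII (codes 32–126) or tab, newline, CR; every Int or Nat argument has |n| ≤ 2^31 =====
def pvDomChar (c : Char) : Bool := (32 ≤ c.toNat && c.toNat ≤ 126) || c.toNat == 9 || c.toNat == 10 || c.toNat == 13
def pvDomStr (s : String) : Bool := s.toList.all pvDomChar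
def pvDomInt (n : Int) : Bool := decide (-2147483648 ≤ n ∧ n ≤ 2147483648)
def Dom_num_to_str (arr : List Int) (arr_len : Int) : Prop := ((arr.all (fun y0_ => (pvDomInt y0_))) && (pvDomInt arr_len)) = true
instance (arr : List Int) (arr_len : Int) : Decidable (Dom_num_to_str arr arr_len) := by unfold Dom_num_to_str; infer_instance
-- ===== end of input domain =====

-- B replaces A's per-byte shift/mask/prepend inner loop by one masked big-endian byte conversion
-- per value joined at the end (objective: idiomatic; same return value).

-- ===== PORT A =====
-- val & 0xFF is PySem.Int.mod val 256 and val >> 8 is PySem.Int.floordiv val 256 (exact for Python ints).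
def num_to_str (arr : List Int) (arr_len : Int) : String :=
  arr.foldl
    (fun res val =>
      let tmp := (PySem.List.pyRange 0 arr_len 1).foldl
        (fun (st : String × Int) _ =>
          (String.singleton (Char.ofNat (PySem.Int.mod st.2 256).toNat) ++ st.1,
           PySem.Int.floordiv st.2 256))
        ("", val)
      res ++ tmp.1)
    ""

-- ===== PORT B =====
-- port of (v & mask).to_bytes(arr_len, 'big').decode('latin-1'): big-endian byte extraction on the
-- nonnegative masked value (v & mask is PySem.Int.mod v (256^n), exact for Python ints).
def pvBytesBE : Nat → Int → List Char → List Char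
  | 0, _, acc => acc
  | k + 1, m, acc => pvBytesBE k (m / 256) (Char.ofNat (m % 256).toNat :: acc)

def num_to_str_alt (arr : List Int) (arr_len : Int) : String :=
  if arr_len ≤ 0 then ""
  else
    String.join (arr.map (fun v =>
      String.ofList (pvBytesBE arr_len.toNat (PySem.Int.mod v ((256 : Int) ^ arr_len.toNat)) [])))

-- ===== PRECONDITION & SPEC =====
def Spec_num_to_str (arr : List Int) (arr_len : Int) (out : String) : Prop := out = num_to_str_alt arr arr_len
instance (arr : List Int) (arr_len : Int) (out : String) : Decidable (Spec_num_to_str arr arr_len out) := by unfold Spec_num_to_str; infer_instance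

-- ===== CLAIM (what is proved, stated in full; the proofs are below) =====
def Claim_equal_num_to_str : Prop := ∀ (arr : List Int) (arr_len : Int), Dom_num_to_str arr arr_len → Spec_num_to_str arr arr_len (num_to_str arr arr_len)

-- ===== LEMMAS AND PROOFS =====

-- the inner-loop step of A, as a function of the state only (the range element is unused)
def pvStep (st : String × Int) : String × Int :=
  (String.singleton (Char.ofNat (PySem.Int.mod st.2 256).toNat) ++ st.1,
   PySem.Int.floordiv st.2 256)

theorem pv_foldl_ignore {α β : Type} (g : β → β) :
    ∀ (l : List α) (s : β), l.foldl (fun s _ => g s) s = g^[l.length] s := by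
  intro l
  induction l with
  | nil => intro s; rfl
  | cons x xs ih =>
      intro s
      simp [List.foldl, ih, Function.iterate_succ_apply]

theorem pv_div_mod_split (v K : Int) (hK : 0 < K) :
    (v % (256 * K)) / 256 = (v / 256) % K ∧ (v % (256 * K)) % 256 = v % 256 := by
  have hdvd : (256 : Int) ∣ 256 * K := ⟨K, rfl⟩
  refine ⟨?_, Int.emod_emod_of_dvd v hdvd⟩
  have h1 : v % (256 * K) = v - 256 * K * (v / (256 * K)) := by
    rw [Int.emod_def]
  have h2 : v / 256 / K = v / (256 * K) := Int.ediv_ediv_of_nonneg (by norm_num)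
  have h3 : v / 256 % K = v / 256 - K * (v / 256 / K) := by
    rw [Int.emod_def]
  have h4 : v % 256 = v - 256 * (v / 256) := by rw [Int.emod_def]
  have hv256 : 0 ≤ v % 256 ∧ v % 256 < 256 := ⟨Int.emod_nonneg v (by norm_num), Int.emod_lt_of_pos v (by norm_num)⟩
  -- characterize the quotient: v % (256*K) = 256 * (v/256 % K) + v % 256
  have hsum : v % (256 * K) = 256 * (v / 256 % K) + v % 256 := by
    rw [h1, h3, h4, ← h2]; ring
  have hmodK : 0 ≤ v / 256 % K ∧ v / 256 % K < K :=
    ⟨Int.emod_nonneg _ (by omega), Int.emod_lt_of_pos _ hK⟩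
  rw [hsum]
  omega

theorem pv_iter_eq : ∀ (n : Nat) (v : Int) (acc : String),
    (pvStep^[n] (acc, v)).1.toList = pvBytesBE n (v % (256 : Int) ^ n) acc.toList := by
  intro n
  induction n with
  | zero => intro v acc; simp [pvBytesBE]
  | succ k ih =>
      intro v acc
      have hK : (0 : Int) < 256 ^ k := by positivity
      obtain ⟨hdiv, hmod⟩ := pv_div_mod_split v ((256 : Int) ^ k) hK
      have hpow : (256 : Int) ^ (k + 1) = 256 * 256 ^ k := by ring
      rw [Function.iterate_succ_apply]
      have hstep : pvStep (acc, v) =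
          (String.singleton (Char.ofNat (v % 256).toNat) ++ acc, v / 256) := by
        simp [pvStep]
      rw [hstep, ih, pvBytesBE, hpow, hdiv, hmod]
      simp

theorem pv_inner_eq (arr_len : Int) (v : Int) :
    ((PySem.List.pyRange 0 arr_len 1).foldl
        (fun (st : String × Int) _ =>
          (String.singleton (Char.ofNat (PySem.Int.mod st.2 256).toNat) ++ st.1,
           PySem.Int.floordiv st.2 256)) ("", v)).1 =
      (if arr_len ≤ 0 then ""
       else String.ofList (pvBytesBE arr_len.toNat (PySem.Int.mod v ((256 : Int) ^ arr_len.toNat)) [])) := by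
  have hfold := pv_foldl_ignore pvStep (PySem.List.pyRange 0 arr_len 1) ("", v)
  have hstepdef : (fun (st : String × Int) _ =>
      (String.singleton (Char.ofNat (PySem.Int.mod st.2 256).toNat) ++ st.1,
       PySem.Int.floordiv st.2 256)) = (fun (st : String × Int) (_ : Int) => pvStep st) := rfl
  rw [hstepdef, hfold]
  have hlen : (PySem.List.pyRange 0 arr_len 1).length = arr_len.toNat := by
    rw [PySem.List.length_pyRange_one]; simp
  rw [hlen]
  by_cases h : arr_len ≤ 0
  · have : arr_len.toNat = 0 := by omega
    simp [this, h]
  · have hn : (0:Int) < (256 : Int) ^ arr_len.toNat := by positivity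
    have := pv_iter_eq arr_len.toNat v ""
    rw [if_neg h]
    apply String.ext
    rw [this, PySem.Int.mod_eq_emod_of_pos hn]
    simp [String.toList_ofList]

-- ===== VERDICT (by name: the statement is the Claim_ definition above) =====
theorem num_to_str_spec : Claim_equal_num_to_str := by
  intro arr arr_len hD
  clear hD
  unfold Spec_num_to_str num_to_str num_to_str_alt
  by_cases h : arr_len ≤ 0
  · rw [if_pos h]
    induction arr with
    | nil => rfl
    | cons x xs ih =>
        simp only [List.foldl]
        rw [pv_inner_eq, if_pos h]
        simpa using ih
  · rw [if_neg h]
    have : ∀ (init : String),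
        arr.foldl (fun res val =>
          res ++ ((PySem.List.pyRange 0 arr_len 1).foldl
            (fun (st : String × Int) _ =>
              (String.singleton (Char.ofNat (PySem.Int.mod st.2 256).toNat) ++ st.1,
               PySem.Int.floordiv st.2 256)) ("", val)).1) init =
        arr.foldl (fun res v =>
          res ++ String.ofList (pvBytesBE arr_len.toNat (PySem.Int.mod v ((256 : Int) ^ arr_len.toNat)) [])) init := by
      induction arr with
      | nil => intro init; rfl
      | cons x xs ih =>
          intro init
          simp only [List.foldl]
          rw [pv_inner_eq, if_neg h, ih]
    rw [this "", String.join, List.foldl_map]
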